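-- pv_equiv track=rewrite | github.com/djirvine/foobar | 3a - Queue-to-do-checksum.py | solution
-- ===== SOURCE A (Python) =====
-- def solution(s,l):
--     q = []
--     for add in range(l):
--         for n in range(s, s + l - add):
--             n = n + add * l
--             if n > 2 * 10 ** 9:
--                 n = n - 1 - 2 * 10 ** 9
--             q.append(n)
--     x = q[0]
--     if len(q) > 1:
--        for i in range(1, len(q)):
--             x = x ^ q[i]
--             prev = x
--     return x
-- ===== SOURCE B (Python) =====
-- def solution(s, l):
--     LIMIT = 2 * 10 ** 9
--
--     def xor_upto(n):  # XOR of 0..n, valid for n >= -1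
--         r = n % 4
--         if r == 0:
--             return n
--         if r == 1:
--             return 1
--         if r == 2:
--             return n + 1
--         return 0
--
--     def xor_range(a, b):  # XOR of all integers in [a, b), any sign
--         if a >= b:
--             return 0
--         if a >= 0:
--             return xor_upto(b - 1) ^ xor_upto(a - 1)
--         if b <= 0:
--             v = xor_range(-b, -a)  # complements of [a,b) are [-b,-a)
--             return v if (b - a) % 2 == 0 else -v - 1
--         return xor_range(a, 0) ^ xor_range(0, b)
--
--     x = 0
--     for add in range(l):
--         lo = s + add * l
--         hi = lo + (l - add)  # exclusive end of this row
--         if lo > LIMIT: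
--             x ^= xor_range(lo - 1 - LIMIT, hi - 1 - LIMIT)
--         elif hi - 1 > LIMIT:
--             x ^= xor_range(lo, LIMIT + 1) ^ xor_range(0, hi - 1 - LIMIT)
--         else:
--             x ^= xor_range(lo, hi)
--     return x
-- ===== Notes on version B (the rewrite author's own statement) =====
-- stated objective: faster
-- what changed: Replaces the O(l^2) materialisation of every wrapped ID followed by an element-by-element XOR with an O(l) loop that XORs each row via the closed-form prefix-XOR formula, splitting a row at the wrap boundary into at most two contiguous ranges.
import Mathlib
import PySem

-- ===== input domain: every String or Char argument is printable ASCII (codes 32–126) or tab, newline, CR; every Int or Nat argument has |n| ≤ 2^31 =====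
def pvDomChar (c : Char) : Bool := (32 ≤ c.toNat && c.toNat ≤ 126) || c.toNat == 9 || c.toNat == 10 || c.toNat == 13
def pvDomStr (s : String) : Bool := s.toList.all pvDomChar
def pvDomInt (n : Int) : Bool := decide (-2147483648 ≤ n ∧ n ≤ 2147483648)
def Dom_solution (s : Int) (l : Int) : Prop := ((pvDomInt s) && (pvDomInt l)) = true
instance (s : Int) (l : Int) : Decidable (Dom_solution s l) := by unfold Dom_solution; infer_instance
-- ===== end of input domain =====

-- B replaces A's materialise-every-ID-then-XOR double loop by a single loop over rows that
-- XORs each row via the closed-form prefix-XOR of a contiguous range, split at the wrap boundary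
-- (objective: faster, O(l^2) -> O(l)).

-- ===== PORT A =====
def solution (s : Int) (l : Int) : Int :=
  let q : List Int :=
    (PySem.List.pyRange 0 l 1).foldl (fun q add =>
      (PySem.List.pyRange s (s + l - add) 1).foldl (fun q n =>
        let n1 := n + add * l
        let n2 := if n1 > 2 * 10 ^ 9 then n1 - 1 - 2 * 10 ^ 9 else n1
        q ++ [n2]) q) []
  let x := PySem.List.pyGetD q 0 0
  if PySem.List.len q > 1 then
    (PySem.List.pyRange 1 (PySem.List.len q) 1).foldl
      (fun x i => PySem.Int.bxor x (PySem.List.pyGetD q i 0)) x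
  else x

-- ===== PORT B =====
-- XOR of 0..n (inclusive), valid for n >= -1; Python's `xor_upto` in Source B.
def xorUpto (n : Int) : Int :=
  let r := PySem.Int.mod n 4
  if r = 0 then n
  else if r = 1 then 1
  else if r = 2 then n + 1
  else 0

-- XOR of all integers in [a, b), any sign; Python's `xor_range` in Source B.
def xorRange (a b : Int) : Int :=
  if b ≤ a then 0
  else if 0 ≤ a then PySem.Int.bxor (xorUpto (b - 1)) (xorUpto (a - 1))
  else if b ≤ 0 then
    let v := xorRange (-b) (-a)
    if PySem.Int.mod (b - a) 2 = 0 then v else -v - 1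
  else PySem.Int.bxor (xorRange a 0) (xorRange 0 b)
termination_by ((if 0 ≤ a then 0 else if b ≤ 0 then 1 else 2 : Nat))
decreasing_by all_goals (split_ifs <;> omega)

def solution_alt (s : Int) (l : Int) : Int :=
  (PySem.List.pyRange 0 l 1).foldl (fun x add =>
    let lo := s + add * l
    let hi := lo + (l - add)
    let v :=
      if lo > 2 * 10 ^ 9 then xorRange (lo - 1 - 2 * 10 ^ 9) (hi - 1 - 2 * 10 ^ 9)
      else if hi - 1 > 2 * 10 ^ 9 then
        PySem.Int.bxor (xorRange lo (2 * 10 ^ 9 + 1)) (xorRange 0 (hi - 1 - 2 * 10 ^ 9))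
      else xorRange lo hi
    PySem.Int.bxor x v) 0

-- ===== PRECONDITION & SPEC =====
-- Pre_ excludes only l ≤ 0, on which A's queue is empty and `q[0]` raises IndexError.
def Pre_solution (s : Int) (l : Int) : Prop := 1 ≤ l
instance (s : Int) (l : Int) : Decidable (Pre_solution s l) := by unfold Pre_solution; infer_instance
def pvWitness_solution : Int × Int := (7, 3)

def Spec_solution (s : Int) (l : Int) (out : Int) : Prop := out = solution_alt s l
instance (s : Int) (l : Int) (out : Int) : Decidable (Spec_solution s l out) := by unfold Spec_solution; infer_instance

-- ===== CLAIM (what is proved, stated in full; the proofs are below) =====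
def Claim_equal_solution : Prop := ∀ (s : Int) (l : Int), Dom_solution s l → Pre_solution s l → Spec_solution s l (solution s l)

-- ===== LEMMAS AND PROOFS =====

theorem bx_nneg (m n : Nat) : PySem.Int.bxor (↑m) (-(n:Int) - 1) = -((m ^^^ n : Nat) : Int) - 1 := by
  unfold PySem.Int.bxor
  rw [if_pos (by positivity : (0:Int) ≤ ↑m), if_neg (by omega : ¬ (0:Int) ≤ -(n:Int) - 1),
      show (-(-(n:Int) - 1) - 1) = ↑n from by ring]
  simp
theorem bx_negn (m n : Nat) : PySem.Int.bxor (-(m:Int) - 1) (↑n) = -((m ^^^ n : Nat) : Int) - 1 := by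
  unfold PySem.Int.bxor
  rw [if_neg (by omega : ¬ (0:Int) ≤ -(m:Int) - 1), if_pos (by positivity : (0:Int) ≤ (n:Int)),
      show (-(-(m:Int) - 1) - 1) = ↑m from by ring]
  simp
theorem bx_negneg (m n : Nat) : PySem.Int.bxor (-(m:Int) - 1) (-(n:Int) - 1) = ((m ^^^ n : Nat) : Int) := by
  unfold PySem.Int.bxor
  rw [if_neg (by omega : ¬ (0:Int) ≤ -(m:Int) - 1), if_neg (by omega : ¬ (0:Int) ≤ -(n:Int) - 1),
      show (-(-(m:Int) - 1) - 1) = ↑m from by ring, show (-(-(n:Int) - 1) - 1) = ↑n from by ring]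
  simp

theorem int_rep (a : Int) : (∃ m : Nat, a = ↑m) ∨ (∃ m : Nat, a = -(m:Int) - 1) := by
  rcases Int.lt_or_le a 0 with h | h
  · exact Or.inr ⟨(-a - 1).toNat, by omega⟩
  · exact Or.inl ⟨a.toNat, by omega⟩
theorem bx_assoc (a b c : Int) :
    PySem.Int.bxor (PySem.Int.bxor a b) c = PySem.Int.bxor a (PySem.Int.bxor b c) := by
  rcases int_rep a with ⟨x, rfl⟩ | ⟨x, rfl⟩ <;> rcases int_rep b with ⟨y, rfl⟩ | ⟨y, rfl⟩ <;>
    rcases int_rep c with ⟨z, rfl⟩ | ⟨z, rfl⟩ <;>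
    simp [PySem.Int.bxor_natCast, bx_nneg, bx_negn, bx_negneg, Nat.xor_assoc]
theorem bx_not_left (a b : Int) :
    PySem.Int.bxor (-a - 1) b = -(PySem.Int.bxor a b) - 1 := by
  rcases int_rep a with ⟨x, rfl⟩ | ⟨x, rfl⟩ <;> rcases int_rep b with ⟨y, rfl⟩ | ⟨y, rfl⟩
  · simpa using bx_negn x y
  · rw [bx_nneg, bx_negneg]; omega
  · rw [show (-(-(x:Int) - 1) - 1) = ↑x from by ring, PySem.Int.bxor_natCast, bx_negn]; omega
  · rw [show (-(-(x:Int) - 1) - 1) = ↑x from by ring, bx_nneg, bx_negneg]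
theorem bx_zero_left (a : Int) : PySem.Int.bxor 0 a = a := by
  rw [PySem.Int.bxor_comm, PySem.Int.bxor_zero]
theorem bx_cancel (u v : Int) : PySem.Int.bxor u (PySem.Int.bxor u v) = v := by
  rw [← bx_assoc, PySem.Int.bxor_self, bx_zero_left]
def xorL (xs : List Int) : Int := xs.foldl PySem.Int.bxor 0
theorem foldl_bx_init (ys : List Int) (i : Int) :
    ys.foldl PySem.Int.bxor i = PySem.Int.bxor i (xorL ys) := by
  induction ys generalizing i with
  | nil => simp [xorL, PySem.Int.bxor_zero]
  | cons y ys ih =>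
    simp only [xorL, List.foldl_cons]
    rw [ih, ih (PySem.Int.bxor 0 y), bx_zero_left, bx_assoc]
theorem xorL_cons (y : Int) (ys : List Int) : xorL (y :: ys) = PySem.Int.bxor y (xorL ys) := by
  simp only [xorL, List.foldl_cons, bx_zero_left]; exact foldl_bx_init ys y
theorem xorL_append (xs ys : List Int) :
    xorL (xs ++ ys) = PySem.Int.bxor (xorL xs) (xorL ys) := by
  simp only [xorL, List.foldl_append]; exact foldl_bx_init ys (xorL xs)
theorem xorL_singleton (y : Int) : xorL [y] = y := by
  simp [xorL, bx_zero_left]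
theorem xorL_reverse (xs : List Int) : xorL xs.reverse = xorL xs := by
  induction xs with
  | nil => rfl
  | cons x xs ih =>
    rw [List.reverse_cons, xorL_append, ih, xorL_singleton, xorL_cons, PySem.Int.bxor_comm]
theorem xorL_map_not (xs : List Int) :
    xorL (xs.map (fun k => -k - 1)) =
      if xs.length % 2 = 0 then xorL xs else -(xorL xs) - 1 := by
  induction xs with
  | nil => simp [xorL]
  | cons x xs ih =>
    rw [List.map_cons, xorL_cons, ih, xorL_cons]
    by_cases h0 : xs.length % 2 = 0
    · have h1 : ¬ ((x :: xs).length % 2 = 0) := by rw [List.length_cons]; omega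
      rw [if_pos h0, if_neg h1, bx_not_left]
    · have h1 : (x :: xs).length % 2 = 0 := by rw [List.length_cons]; omega
      rw [if_neg h0, if_pos h1, bx_not_left, PySem.Int.bxor_comm x (-(xorL xs) - 1),
          bx_not_left, PySem.Int.bxor_comm]
      ring
def natUpto (m : Nat) : Nat :=
  if m % 4 = 0 then m else if m % 4 = 1 then 1 else if m % 4 = 2 then m + 1 else 0
theorem even_xor_one (m : Nat) (h : m % 2 = 0) : m ^^^ 1 = m + 1 := by
  obtain ⟨k, rfl⟩ : ∃ k, m = 2 * k := ⟨m / 2, by omega⟩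
  apply Nat.eq_of_testBit_eq
  intro i
  cases i with
  | zero => simp [Nat.testBit_zero]
  | succ j => simp [Nat.testBit_succ]
theorem natUpto_step (m : Nat) : natUpto m ^^^ (m + 1) = natUpto (m + 1) := by
  unfold natUpto
  have h4 : m % 4 = 0 ∨ m % 4 = 1 ∨ m % 4 = 2 ∨ m % 4 = 3 := by omega
  rcases h4 with h | h | h | h
  · rw [if_pos h, if_neg (by omega), if_pos (by omega)]
    rw [← even_xor_one m (by omega), ← Nat.xor_assoc, Nat.xor_self, Nat.zero_xor]
  · rw [if_neg (by omega), if_pos h, if_neg (by omega), if_neg (by omega), if_pos (by omega)]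
    rw [Nat.xor_comm, even_xor_one (m+1) (by omega)]
  · rw [if_neg (by omega), if_neg (by omega), if_pos h,
        if_neg (by omega), if_neg (by omega), if_neg (by omega)]
    exact Nat.xor_self (m+1)
  · rw [if_neg (by omega), if_neg (by omega), if_neg (by omega), if_pos (by omega)]
    exact Nat.zero_xor (m+1)
theorem mod_natCast4 (m : Nat) : PySem.Int.mod (↑m) 4 = ↑(m % 4) := by
  simp [PySem.Int.mod, Int.fmod_eq_emod]
theorem xorUpto_natCast (m : Nat) : xorUpto (↑m) = ↑(natUpto m) := by
  unfold xorUpto natUpto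
  simp only [mod_natCast4]
  have h4 : m % 4 = 0 ∨ m % 4 = 1 ∨ m % 4 = 2 ∨ m % 4 = 3 := by omega
  rcases h4 with h | h | h | h <;> rw [h] <;> norm_num
theorem xorUpto_step (n : Int) (h : 0 ≤ n) :
    PySem.Int.bxor (xorUpto (n - 1)) n = xorUpto n := by
  rcases Nat.eq_zero_or_pos n.toNat with h0 | h0
  · have : n = 0 := by omega
    subst this; decide
  · obtain ⟨m, rfl⟩ : ∃ m : Nat, n = ↑(m + 1) := ⟨n.toNat - 1, by omega⟩
    rw [show ((↑(m+1) : Int) - 1 : Int) = ↑m from by push_cast; ring,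
        xorUpto_natCast, xorUpto_natCast, PySem.Int.bxor_natCast, natUpto_step]
theorem xorL_prefix (m : Nat) : xorL (PySem.List.pyRange 0 (↑m) 1) = xorUpto ((m : Int) - 1) := by
  induction m with
  | zero => rw [PySem.List.pyRange_one_eq_nil (by norm_num)]; decide
  | succ k ih =>
    rw [show ((↑(k+1) : Int)) = (k:Int) + 1 from by push_cast; ring,
        PySem.List.pyRange_one_succ_right (by positivity), xorL_append, xorL_singleton, ih,
        show ((k:Int) + 1 - 1 : Int) = ↑k from by ring,
        xorUpto_step ↑k (by positivity)]
theorem XR_nn (a b : Int) (ha : 0 ≤ a) : xorL (PySem.List.pyRange a b 1) = xorRange a b := by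
  rw [xorRange]
  by_cases hba : b ≤ a
  · rw [if_pos hba, PySem.List.pyRange_one_eq_nil hba]; rfl
  · rw [if_neg hba, if_pos ha]
    obtain ⟨an, rfl⟩ : ∃ m : Nat, a = ↑m := ⟨a.toNat, by omega⟩
    obtain ⟨bn, rfl⟩ : ∃ m : Nat, b = ↑m := ⟨b.toNat, by omega⟩
    have hsplit := PySem.List.pyRange_one_append 0 (↑an) (↑bn) (by positivity) (by omega)
    have := xorL_prefix bn
    rw [hsplit, xorL_append, xorL_prefix an] at this
    -- this : bxor (xorUpto (an-1)) (xorL (pyRange an bn)) = xorUpto (bn-1)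
    rw [← this, PySem.Int.bxor_comm, bx_cancel]
theorem map_not_pyRange (a b : Int) :
    (PySem.List.pyRange a b 1).map (fun k => -k - 1) = (PySem.List.pyRange (-b) (-a) 1).reverse := by
  apply List.ext_getElem
  · simp [PySem.List.length_pyRange_one]; omega
  · intro i h1 h2
    rw [List.getElem_map, PySem.List.getElem_pyRange_one]
    rw [List.getElem_reverse, PySem.List.getElem_pyRange_one]
    simp [PySem.List.length_pyRange_one] at h1 h2 ⊢
    omega
theorem XR_np (a b : Int) (hb : b ≤ 0) : xorL (PySem.List.pyRange a b 1) = xorRange a b := by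
  rw [xorRange]
  by_cases hba : b ≤ a
  · rw [if_pos hba, PySem.List.pyRange_one_eq_nil hba]; rfl
  · have ha : ¬ (0 ≤ a) := by omega
    rw [if_neg hba, if_neg ha, if_pos hb]
    have hinv : PySem.List.pyRange a b 1 =
        ((PySem.List.pyRange (-b) (-a) 1).reverse).map (fun k => -k - 1) := by
      rw [← map_not_pyRange, List.map_map]
      calc PySem.List.pyRange a b 1
          = (PySem.List.pyRange a b 1).map id := (List.map_id _).symm
        _ = (PySem.List.pyRange a b 1).map ((fun k => -k - 1) ∘ fun k => -k - 1) := by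
            apply List.map_congr_left; intro x _; show x = -(-x-1) - 1; ring
    rw [hinv, xorL_map_not, xorL_reverse, List.length_reverse, PySem.List.length_pyRange_one,
        XR_nn (-b) (-a) (by omega)]
    have hlen : ((-a) - (-b)).toNat = (b - a).toNat := by omega
    have hmod : PySem.Int.mod (b - a) 2 = (b - a) % 2 := by
      simp [PySem.Int.mod, Int.fmod_eq_emod]
    by_cases hp : (b - a) % 2 = 0
    · rw [if_pos (by omega), hmod, if_pos hp]
    · rw [if_neg (by omega), hmod, if_neg hp]
theorem XR (a b : Int) : xorL (PySem.List.pyRange a b 1) = xorRange a b := by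
  by_cases ha : 0 ≤ a
  · exact XR_nn a b ha
  · by_cases hb : b ≤ 0
    · exact XR_np a b hb
    · rw [xorRange, if_neg (by omega), if_neg ha, if_neg hb,
          PySem.List.pyRange_one_append a 0 b (by omega) (by omega), xorL_append,
          XR_np a 0 le_rfl, XR_nn 0 b le_rfl]
theorem pyRange_shift (a b c : Int) :
    (PySem.List.pyRange a b 1).map (fun n => n + c) = PySem.List.pyRange (a + c) (b + c) 1 := by
  apply List.ext_getElem
  · simp [PySem.List.length_pyRange_one]
  · intro i h1 h2
    rw [List.getElem_map, PySem.List.getElem_pyRange_one, PySem.List.getElem_pyRange_one]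
    ring
def wrapv (n : Int) : Int := if n > 2 * 10 ^ 9 then n - 1 - 2 * 10 ^ 9 else n
def rowVal (s l add : Int) : Int :=
  let lo := s + add * l
  let hi := lo + (l - add)
  if lo > 2 * 10 ^ 9 then xorRange (lo - 1 - 2 * 10 ^ 9) (hi - 1 - 2 * 10 ^ 9)
  else if hi - 1 > 2 * 10 ^ 9 then
    PySem.Int.bxor (xorRange lo (2 * 10 ^ 9 + 1)) (xorRange 0 (hi - 1 - 2 * 10 ^ 9))
  else xorRange lo hi
theorem row_eq (s l add : Int) :
    xorL ((PySem.List.pyRange s (s + l - add) 1).map (fun n => wrapv (n + add * l))) = rowVal s l add := by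
  unfold rowVal
  have hmm : (PySem.List.pyRange s (s + l - add) 1).map (fun n => wrapv (n + add * l))
      = (PySem.List.pyRange (s + add * l) (s + l - add + add * l) 1).map wrapv := by
    rw [← pyRange_shift s (s + l - add) (add * l), List.map_map]; rfl
  rw [hmm]
  set L : Int := 2 * 10 ^ 9 with hL
  set lo := s + add * l with hlo
  have he : s + l - add + add * l = lo + (l - add) := by ring
  rw [he]
  set hi := lo + (l - add) with hhi
  by_cases h1 : lo > L
  · rw [if_pos h1]
    have : (PySem.List.pyRange lo hi 1).map wrapv = PySem.List.pyRange (lo - 1 - L) (hi - 1 - L) 1 := by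
      rw [List.map_congr_left (g := fun n => n + (-1 - L)) (fun x hx => by
        have := PySem.List.mem_pyRange_one.mp hx
        unfold wrapv; rw [if_pos (by omega)]; ring)]
      rw [pyRange_shift]
      congr 1 <;> ring
    rw [this, XR]
  · rw [if_neg h1]
    by_cases h2 : hi - 1 > L
    · rw [if_pos h2]
      rw [PySem.List.pyRange_one_append lo (L + 1) hi (by omega) (by omega), List.map_append,
          xorL_append]
      have e1 : (PySem.List.pyRange lo (L + 1) 1).map wrapv = PySem.List.pyRange lo (L + 1) 1 := by
        rw [List.map_congr_left (g := id) (fun x hx => by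
          have := PySem.List.mem_pyRange_one.mp hx
          unfold wrapv; rw [if_neg (by omega)]; rfl)]
        exact List.map_id _
      have e2 : (PySem.List.pyRange (L + 1) hi 1).map wrapv = PySem.List.pyRange 0 (hi - 1 - L) 1 := by
        rw [List.map_congr_left (g := fun n => n + (-1 - L)) (fun x hx => by
          have := PySem.List.mem_pyRange_one.mp hx
          unfold wrapv; rw [if_pos (by omega)]; ring)]
        rw [pyRange_shift]
        congr 1 <;> ring
      rw [e1, e2, XR, XR]
    · rw [if_neg h2]
      have e1 : (PySem.List.pyRange lo hi 1).map wrapv = PySem.List.pyRange lo hi 1 := by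
        rw [List.map_congr_left (g := id) (fun x hx => by
          have := PySem.List.mem_pyRange_one.mp hx
          unfold wrapv; rw [if_neg (by omega)]; rfl)]
        exact List.map_id _
      rw [e1, XR]
theorem xorL_flatMap (xs : List Int) (g : Int → List Int) :
    xorL (xs.flatMap g) = xs.foldl (fun acc x => PySem.Int.bxor acc (xorL (g x))) 0 := by
  suffices h : ∀ i, (xs.flatMap g).foldl PySem.Int.bxor i = xs.foldl (fun acc x => PySem.Int.bxor acc (xorL (g x))) i by
    exact h 0
  induction xs with
  | nil => intro i; rfl
  | cons x xs ih =>
    intro i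
    rw [List.flatMap_cons, List.foldl_append, List.foldl_cons, foldl_bx_init (g x) i, ih]
theorem A_tail (q : List Int) (hq : q ≠ []) :
    (if PySem.List.len q > 1 then
      (PySem.List.pyRange 1 (PySem.List.len q) 1).foldl
        (fun x i => PySem.Int.bxor x (PySem.List.pyGetD q i 0)) (PySem.List.pyGetD q 0 0)
     else PySem.List.pyGetD q 0 0) = xorL q := by
  obtain ⟨h, t, rfl⟩ := List.exists_cons_of_ne_nil hq
  by_cases hlen : PySem.List.len (h :: t) > 1
  · rw [if_pos hlen, PySem.List.len_eq,
        PySem.List.foldl_pyRange_pyGetD' (h :: t) 0 PySem.Int.bxor _ (by norm_num)]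
    rw [show ((1:Int)).toNat = 1 from rfl, List.drop_one, List.tail_cons,
        PySem.List.pyGetD_zero_cons, xorL_cons, foldl_bx_init, PySem.Int.bxor_comm]
  · rw [if_neg hlen]
    have : t = [] := by
      rw [PySem.List.len_eq] at hlen
      push Not at hlen
      rw [List.length_cons] at hlen
      have ht : t.length = 0 := by push_cast at hlen; omega
      exact List.eq_nil_of_length_eq_zero ht
    subst this
    rw [PySem.List.pyGetD_zero_cons, xorL_singleton]

theorem main_eq (s l : Int) (hl : 1 ≤ l) : solution s l = solution_alt s l := by
  unfold solution
  simp only [PySem.List.foldl_append_singleton_eq_map, PySem.List.foldl_append_eq_flatMap,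
    List.nil_append]
  set G : Int → List Int := fun add =>
    (PySem.List.pyRange s (s + l - add) 1).map (fun n => wrapv (n + add * l)) with hG
  have hGdef : (fun add => (PySem.List.pyRange s (s + l - add) 1).map
      (fun n => if n + add * l > 2 * 10 ^ 9 then n + add * l - 1 - 2 * 10 ^ 9 else n + add * l)) = G := by
    funext add; rw [hG]; rfl
  rw [hGdef]
  have hne : (PySem.List.pyRange 0 l 1).flatMap G ≠ [] := by
    rw [PySem.List.pyRange_one_cons (by omega : (0:Int) < l), List.flatMap_cons]
    intro hcon
    rcases List.append_eq_nil_iff.mp hcon with ⟨h1, _⟩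
    have : (G 0).length = (s + l - s).toNat := by
      rw [hG]; simp [PySem.List.length_pyRange_one]
    rw [h1] at this
    simp at this
    omega
  rw [A_tail _ hne, xorL_flatMap]
  have hrow : (fun (acc : Int) (add : Int) => PySem.Int.bxor acc (xorL (G add)))
      = (fun acc add => PySem.Int.bxor acc (rowVal s l add)) := by
    funext acc add
    rw [hG, row_eq]
  rw [hrow]
  unfold solution_alt rowVal
  rfl

-- ===== VERDICT (by name: the statement is the Claim_ definition above) =====
theorem solution_spec : Claim_equal_solution := by
  intro s l _ hp
  unfold Spec_solution
  exact main_eq s l hp
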